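-- pv_equiv track=rewrite | github.com/shimi-lab/GRRMPY | grrmpy/conv/atoms2mol.py | _renumbering_target
-- ===== SOURCE A (Python) =====
-- def _renumbering_target(n_atoms,target0,target1,target2):
--     if target0 is None:
--         target0 = [i for i in range(n_atoms)]
--         target1,target2,target3 = [],[],[]
--         return target0,target1,target2,target3
--     else:
--         target3 = [i for i in range(n_atoms) if not i in target0+target1+target2] # どれとも結合しない原子
--         new_target0,new_target1,new_target2 = [],[],[]
--         n = 0
--         for i in range(n_atoms):
--             if not i in target3:
--                 if i in target0:
--                     new_target0.append(n)
--                 elif i in target1: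
--                     new_target1.append(n)
--                 elif i in target2:
--                     new_target2.append(n)
--                 n += 1
--         return new_target0,new_target1,new_target2,target3
-- ===== SOURCE B (Python) =====
-- def _renumbering_target(n_atoms, target0, target1, target2):
--     if target0 is None:
--         return list(range(n_atoms)), [], [], []
--     s0, s1, s2 = set(target0), set(target1), set(target2)
--     union = s0 | s1 | s2
--     members = [i for i in range(n_atoms) if i in union]
--     t0 = [j for j, x in enumerate(members) if x in s0]
--     t1 = [j for j, x in enumerate(members) if x in s1 and x not in s0]
--     t2 = [j for j, x in enumerate(members) if x in s2 and x not in s0 and x not in s1]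
--     t3 = [i for i in range(n_atoms) if i not in union]
--     return t0, t1, t2, t3
-- ===== Notes on version B (the rewrite author's own statement) =====
-- stated objective: faster
-- what changed: Replaces A's single classifying scan with a mutable counter (plus repeated linear membership tests in concatenated lists) by building the set union once, listing the surviving atoms, and producing each output with an independent enumerate-based comprehension using O(1) set lookups.
import Mathlib
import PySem

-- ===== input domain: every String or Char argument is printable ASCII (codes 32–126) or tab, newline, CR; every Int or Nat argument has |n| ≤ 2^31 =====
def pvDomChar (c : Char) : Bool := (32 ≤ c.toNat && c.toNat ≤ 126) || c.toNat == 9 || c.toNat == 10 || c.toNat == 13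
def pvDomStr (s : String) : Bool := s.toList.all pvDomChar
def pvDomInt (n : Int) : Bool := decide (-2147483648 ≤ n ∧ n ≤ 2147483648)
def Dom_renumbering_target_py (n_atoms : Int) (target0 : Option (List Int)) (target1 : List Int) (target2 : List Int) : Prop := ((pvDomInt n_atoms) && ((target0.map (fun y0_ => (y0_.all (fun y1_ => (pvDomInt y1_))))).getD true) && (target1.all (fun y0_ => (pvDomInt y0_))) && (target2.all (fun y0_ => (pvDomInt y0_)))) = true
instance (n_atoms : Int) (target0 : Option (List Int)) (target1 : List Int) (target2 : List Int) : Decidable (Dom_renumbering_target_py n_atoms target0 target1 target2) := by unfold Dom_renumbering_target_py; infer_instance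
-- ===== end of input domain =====

-- B replaces A's one classifying scan with a counter (and linear membership in concatenated
-- lists) by a remap of surviving atoms built once from the set union, then independent
-- enumerate-based comprehensions per output list; measurably faster (set lookups, no list concat scan).

-- ===== PORT A =====
def renumbering_target_py (n_atoms : Int) (target0 : Option (List Int)) (target1 : List Int) (target2 : List Int) : List Int × List Int × List Int × List Int :=
  match target0 with
  | none => (PySem.List.pyRange 0 n_atoms 1, [], [], [])
  | some target0 =>
    let target3 := (PySem.List.pyRange 0 n_atoms 1).filter
      (fun i => !((target0 ++ target1 ++ target2).contains i))
    let st := (PySem.List.pyRange 0 n_atoms 1).foldl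
      (fun (st : List Int × List Int × List Int × Int) i =>
        if !(target3.contains i) then
          if target0.contains i then (st.1 ++ [st.2.2.2], st.2.1, st.2.2.1, st.2.2.2 + 1)
          else if target1.contains i then (st.1, st.2.1 ++ [st.2.2.2], st.2.2.1, st.2.2.2 + 1)
          else if target2.contains i then (st.1, st.2.1, st.2.2.1 ++ [st.2.2.2], st.2.2.2 + 1)
          else (st.1, st.2.1, st.2.2.1, st.2.2.2 + 1)
        else st) ([], [], [], 0)
    (st.1, st.2.1, st.2.2.1, target3)

-- ===== PORT B =====
def renumbering_target_py_alt (n_atoms : Int) (target0 : Option (List Int)) (target1 : List Int) (target2 : List Int) : List Int × List Int × List Int × List Int :=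
  match target0 with
  | none => (PySem.List.pyRange 0 n_atoms 1, [], [], [])
  | some t0 =>
    let s0 : PySem.Set Int := PySem.Set.ofList t0
    let s1 : PySem.Set Int := PySem.Set.ofList target1
    let s2 : PySem.Set Int := PySem.Set.ofList target2
    let u : PySem.Set Int := PySem.Set.union (PySem.Set.union s0 s1) s2
    let members := (PySem.List.pyRange 0 n_atoms 1).filter (fun i => PySem.Set.contains u i)
    let e := PySem.List.enumerate members 0
    let r0 := (e.filter (fun jx => PySem.Set.contains s0 jx.2)).map (·.1)
    let r1 := (e.filter (fun jx => PySem.Set.contains s1 jx.2 && !PySem.Set.contains s0 jx.2)).map (·.1)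
    let r2 := (e.filter (fun jx => PySem.Set.contains s2 jx.2 && !PySem.Set.contains s0 jx.2 && !PySem.Set.contains s1 jx.2)).map (·.1)
    let r3 := (PySem.List.pyRange 0 n_atoms 1).filter (fun i => !PySem.Set.contains u i)
    (r0, r1, r2, r3)

-- ===== PRECONDITION & SPEC =====
def Spec_renumbering_target_py (n_atoms : Int) (target0 : Option (List Int)) (target1 : List Int) (target2 : List Int) (out : List Int × List Int × List Int × List Int) : Prop := out = renumbering_target_py_alt n_atoms target0 target1 target2
instance (n_atoms : Int) (target0 : Option (List Int)) (target1 : List Int) (target2 : List Int) (out : List Int × List Int × List Int × List Int) : Decidable (Spec_renumbering_target_py n_atoms target0 target1 target2 out) := by unfold Spec_renumbering_target_py; infer_instance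

-- ===== CLAIM (what is proved, stated in full; the proofs are below) =====
def Claim_equal_renumbering_target_py : Prop := ∀ (n_atoms : Int) (target0 : Option (List Int)) (target1 : List Int) (target2 : List Int), Dom_renumbering_target_py n_atoms target0 target1 target2 → Spec_renumbering_target_py n_atoms target0 target1 target2 (renumbering_target_py n_atoms target0 target1 target2)

-- ===== LEMMAS AND PROOFS =====

-- The classifying fold over a list, started at counter k, appends exactly the (offset)
-- positions of the elements selected by each branch's (elif-ordered) condition.
theorem pv_classify_fold (b0 b1 b2 : Int → Bool) :
    ∀ (ms : List Int) (k : Int) (a0 a1 a2 : List Int),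
    ms.foldl
      (fun (st : List Int × List Int × List Int × Int) i =>
        if b0 i then (st.1 ++ [st.2.2.2], st.2.1, st.2.2.1, st.2.2.2 + 1)
        else if b1 i then (st.1, st.2.1 ++ [st.2.2.2], st.2.2.1, st.2.2.2 + 1)
        else if b2 i then (st.1, st.2.1, st.2.2.1 ++ [st.2.2.2], st.2.2.2 + 1)
        else (st.1, st.2.1, st.2.2.1, st.2.2.2 + 1)) (a0, a1, a2, k)
    = (a0 ++ ((PySem.List.enumerate ms k).filter (fun jx => b0 jx.2)).map (·.1),
       a1 ++ ((PySem.List.enumerate ms k).filter (fun jx => b1 jx.2 && !b0 jx.2)).map (·.1),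
       a2 ++ ((PySem.List.enumerate ms k).filter (fun jx => b2 jx.2 && !b0 jx.2 && !b1 jx.2)).map (·.1),
       k + ms.length) := by
  intro ms
  induction ms with
  | nil => intro k a0 a1 a2; simp [PySem.List.enumerate_nil]
  | cons x t ih =>
    intro k a0 a1 a2
    simp only [List.foldl_cons, PySem.List.enumerate_cons, List.filter_cons]
    by_cases h0 : b0 x <;> by_cases h1 : b1 x <;> by_cases h2 : b2 x <;>
      simp [h0, h1, h2, ih, List.append_assoc] <;> push_cast <;> ring_nf

theorem pv_contains_ofList (l : List Int) (x : Int) :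
    PySem.Set.contains (PySem.Set.ofList l) x = l.contains x := by
  by_cases h : x ∈ l
  · simp [PySem.Set.mem_ofList, h]
  · simp [PySem.Set.mem_ofList, h]

theorem pv_union_contains (t0 t1 t2 : List Int) (x : Int) :
    PySem.Set.contains
      (PySem.Set.union (PySem.Set.union (PySem.Set.ofList t0) (PySem.Set.ofList t1)) (PySem.Set.ofList t2)) x
      = (t0 ++ t1 ++ t2).contains x := by
  by_cases h : x ∈ t0 ++ t1 ++ t2
  · simp only [List.mem_append] at h
    simp [PySem.Set.mem_union, PySem.Set.mem_ofList, h, List.mem_append]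
    tauto
  · simp only [List.mem_append] at h
    push_neg at h
    simp [PySem.Set.mem_union, PySem.Set.mem_ofList, h, List.mem_append]

-- ===== VERDICT (by name: the statement is the Claim_ definition above) =====
theorem renumbering_target_py_spec : Claim_equal_renumbering_target_py := by
  intro n_atoms target0 target1 target2 _
  unfold Spec_renumbering_target_py renumbering_target_py renumbering_target_py_alt
  cases target0 with
  | none => rfl
  | some t0 =>
    simp only [pv_contains_ofList, pv_union_contains]
    have h3 : ∀ (st : List Int × List Int × List Int × Int),
        ∀ i ∈ PySem.List.pyRange 0 n_atoms 1,
        (fun (st : List Int × List Int × List Int × Int) i =>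
          if !(((PySem.List.pyRange 0 n_atoms 1).filter
              (fun i => !((t0 ++ target1 ++ target2).contains i))).contains i) then
            if t0.contains i then (st.1 ++ [st.2.2.2], st.2.1, st.2.2.1, st.2.2.2 + 1)
            else if target1.contains i then (st.1, st.2.1 ++ [st.2.2.2], st.2.2.1, st.2.2.2 + 1)
            else if target2.contains i then (st.1, st.2.1, st.2.2.1 ++ [st.2.2.2], st.2.2.2 + 1)
            else (st.1, st.2.1, st.2.2.1, st.2.2.2 + 1)
          else st) st i
        = (fun (st : List Int × List Int × List Int × Int) i =>
          if (t0 ++ target1 ++ target2).contains i then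
            if t0.contains i then (st.1 ++ [st.2.2.2], st.2.1, st.2.2.1, st.2.2.2 + 1)
            else if target1.contains i then (st.1, st.2.1 ++ [st.2.2.2], st.2.2.1, st.2.2.2 + 1)
            else if target2.contains i then (st.1, st.2.1, st.2.2.1 ++ [st.2.2.2], st.2.2.2 + 1)
            else (st.1, st.2.1, st.2.2.1, st.2.2.2 + 1)
          else st) st i := by
      intro st i hi
      have hmem : (((PySem.List.pyRange 0 n_atoms 1).filter
          (fun i => !((t0 ++ target1 ++ target2).contains i))).contains i)
          = !((t0 ++ target1 ++ target2).contains i) := by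
        by_cases hc : i ∈ t0 ++ target1 ++ target2
        · have hc' : (t0 ++ target1 ++ target2).contains i = true := by
            simpa [List.contains_iff_mem] using hc
          simp only [List.contains_iff_mem, List.mem_filter] at *
          simp [hc']
          simp only [List.mem_append] at hc
          intro h0 h1 h2
          tauto
        · have hc' : (t0 ++ target1 ++ target2).contains i = false := by
            simpa [List.contains_iff_mem] using hc
          simp only [List.contains_iff_mem, List.mem_filter] at *
          simp [hc', hi]
      simp only [hmem, Bool.not_not]
    rw [PySem.List.foldl_congr_mem _ _ _ _ h3,
      PySem.List.foldl_if_eq_foldl_filter (fun i => (t0 ++ target1 ++ target2).contains i),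
      pv_classify_fold]
    simp
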